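-- pv_equiv track=rewrite | github.com/ggranberry/acslyst | src/analyzer/output.py | get_classification_difference
-- ===== SOURCE A (Python) =====
-- def get_classification_difference(dict_a , dict_b):
--     result = {}
--
--     # Get all unique keys from both dictionaries
--     all_keys = set(dict_a.keys()) | set(dict_b.keys())
--
--     for key in all_keys:
--         # Get the value from each dictionary, defaulting to 0 if the key is not present
--         a_val = dict_a.get(key, 0)
--         b_val = dict_b.get(key, 0)
--
--         # Calculate the difference and store it in the result dictionary
--         result[key] = b_val - a_val
--     return result
-- ===== SOURCE B (Python) =====
-- def get_classification_difference(dict_a, dict_b):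
--     # Signed accumulation: fold both dicts' items into one running-total dict,
--     # dict_a weighted -1 and dict_b weighted +1; no key union and no cross-dict lookups.
--     result = {}
--     for sign, d in ((-1, dict_a), (1, dict_b)):
--         for key, val in d.items():
--             result[key] = result.get(key, 0) + sign * val
--     return result
-- ===== Notes on version B (the rewrite author's own statement) =====
-- stated objective: alternative
-- what changed: B replaces A's union-of-key-sets pass with per-key lookups into both dicts by a single signed accumulation: each dict's items are folded into one running-total dict (dict_a with weight -1, dict_b with weight +1) using result.get(key, 0), with no union set and no cross-dict lookups.
import Mathlib
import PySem

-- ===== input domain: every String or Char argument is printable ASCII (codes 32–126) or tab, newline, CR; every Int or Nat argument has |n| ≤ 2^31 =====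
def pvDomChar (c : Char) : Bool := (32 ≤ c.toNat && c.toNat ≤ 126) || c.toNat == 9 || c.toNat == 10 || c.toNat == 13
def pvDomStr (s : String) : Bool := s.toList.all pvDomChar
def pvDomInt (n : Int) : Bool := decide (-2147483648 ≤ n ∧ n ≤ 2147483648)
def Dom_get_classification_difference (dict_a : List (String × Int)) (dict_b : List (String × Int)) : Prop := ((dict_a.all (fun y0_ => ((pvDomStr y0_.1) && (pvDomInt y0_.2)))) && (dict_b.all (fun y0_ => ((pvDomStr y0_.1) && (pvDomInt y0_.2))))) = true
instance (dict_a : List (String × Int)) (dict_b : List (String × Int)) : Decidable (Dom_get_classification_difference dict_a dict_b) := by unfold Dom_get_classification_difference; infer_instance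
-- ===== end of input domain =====

-- B replaces A's union-of-key-sets pass (two lookups per key) by one signed accumulation:
-- each dict's items are folded into a single running-total dict (dict_a weighted -1, dict_b +1).
-- ===== PORT A =====
def get_classification_difference (dict_a : List (String × Int)) (dict_b : List (String × Int)) : List (String × Int) :=
  let da := PySem.Dict.ofList dict_a
  let db := PySem.Dict.ofList dict_b
  let all_keys := PySem.Set.union (PySem.Set.ofList da.keys) (PySem.Set.ofList db.keys)
  let result := all_keys.foldl (fun r key =>
    let a_val := da.getD key 0
    let b_val := db.getD key 0
    r.insert key (b_val - a_val)) PySem.Dict.empty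
  result.items

-- ===== PORT B =====
def get_classification_difference_alt (dict_a : List (String × Int)) (dict_b : List (String × Int)) : List (String × Int) :=
  let da := PySem.Dict.ofList dict_a
  let db := PySem.Dict.ofList dict_b
  let result := [((-1 : Int), da), ((1 : Int), db)].foldl
    (fun r sd => sd.2.items.foldl (fun r kv => r.insert kv.1 (r.getD kv.1 0 + sd.1 * kv.2)) r)
    PySem.Dict.empty
  result.items

-- ===== PRECONDITION & SPEC =====
def Spec_get_classification_difference (dict_a : List (String × Int)) (dict_b : List (String × Int)) (out : List (String × Int)) : Prop := out = get_classification_difference_alt dict_a dict_b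
instance (dict_a : List (String × Int)) (dict_b : List (String × Int)) (out : List (String × Int)) : Decidable (Spec_get_classification_difference dict_a dict_b out) := by unfold Spec_get_classification_difference; infer_instance

-- ===== CLAIM (what is proved, stated in full; the proofs are below) =====
def Claim_equal_get_classification_difference : Prop := ∀ (dict_a : List (String × Int)) (dict_b : List (String × Int)), Dom_get_classification_difference dict_a dict_b → Spec_get_classification_difference dict_a dict_b (get_classification_difference dict_a dict_b)

-- ===== LEMMAS AND PROOFS =====

-- getD after B's signed-accumulation loop: old value plus sign times the sum of matching values
theorem accD (s : Int) (l : List (String × Int)) (d : PySem.Dict String Int) (x : String) :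
    (l.foldl (fun r kv => r.insert kv.1 (r.getD kv.1 0 + s * kv.2)) d).getD x 0
      = d.getD x 0 + s * ((l.filter (fun kv => kv.1 == x)).map Prod.snd).sum := by
  induction l generalizing d with
  | nil => simp
  | cons kv t ih =>
    simp only [List.foldl_cons, List.filter_cons, ih]
    by_cases h : kv.1 = x
    · simp [h, mul_add]; ring
    · simp [h, PySem.Dict.getD_insert, (Ne.symm h)]

-- in a list with distinct keys, the sum of the values at key x is the dict lookup
theorem sumf (l : List (String × Int)) (h : (l.map Prod.fst).Nodup) (x : String) :
    ((l.filter (fun kv => kv.1 == x)).map Prod.snd).sum = (PySem.Dict.mk l).getD x 0 := by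
  induction l with
  | nil => simp [PySem.Dict.getD_eq_get?_getD, PySem.Dict.get?]
  | cons kv t ih =>
    obtain ⟨k, v⟩ := kv
    simp only [List.map_cons, List.nodup_cons] at h
    by_cases hx : k = x
    · have ht : t.filter (fun p => p.1 == x) = [] := by
        refine List.filter_eq_nil_iff.mpr ?_
        intro p hp hpx
        exact h.1 (hx ▸ (by simpa using hpx) ▸ List.mem_map_of_mem hp)
      simp [hx, ht, PySem.Dict.getD_eq_get?_getD, PySem.Dict.get?_mk_cons]
    · have hx' : (k == x) = false := by simp [hx]
      simp [hx', ih h.2, PySem.Dict.getD_eq_get?_getD,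
        PySem.Dict.get?_mk_cons]

-- ===== VERDICT (by name: the statement is the Claim_ definition above) =====
theorem get_classification_difference_spec : Claim_equal_get_classification_difference := by
  intro dict_a dict_b _
  show _ = _
  simp only [get_classification_difference, get_classification_difference_alt, List.foldl_cons,
    List.foldl_nil]
  set da := PySem.Dict.ofList dict_a with hda
  set db := PySem.Dict.ofList dict_b with hdb
  have hna : da.keys.Nodup := by
    rw [hda]; exact PySem.Dict.nodup_keys_ofList dict_a
  have hnb : db.keys.Nodup := by
    rw [hdb]; exact PySem.Dict.nodup_keys_ofList dict_b
  have hoa : PySem.Set.ofList da.keys = da.keys := PySem.Set.ofList_eq_self_of_nodup _ hna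
  have hob : PySem.Set.ofList db.keys = db.keys := PySem.Set.ofList_eq_self_of_nodup _ hnb
  -- the union list A iterates over
  have hnu : (PySem.Set.union (PySem.Set.ofList da.keys) (PySem.Set.ofList db.keys)).Nodup :=
    PySem.Set.nodup_union _ _ (by rw [hoa]; exact hna)
  -- A's items: the union keys, each mapped to b_val - a_val
  have hA : (((PySem.Set.union (PySem.Set.ofList da.keys) (PySem.Set.ofList db.keys)).foldl
        (fun r key => r.insert key (db.getD key 0 - da.getD key 0)) PySem.Dict.empty)).items
      = (PySem.Set.union (PySem.Set.ofList da.keys) (PySem.Set.ofList db.keys)).map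
          (fun k => (k, db.getD k 0 - da.getD k 0)) := by
    have := PySem.Dict.items_foldl_insert_fresh
      (l := PySem.Set.union (PySem.Set.ofList da.keys) (PySem.Set.ofList db.keys))
      (k := fun key => key) (v := fun key => db.getD key 0 - da.getD key 0)
      (d := PySem.Dict.empty) (by intro a _; exact PySem.Dict.contains_empty a)
      (by simpa using hnu)
    simpa using this
  -- B's result dict
  set rB := (db.items.foldl (fun r kv => r.insert kv.1 (r.getD kv.1 0 + 1 * kv.2))
      (da.items.foldl (fun r kv => r.insert kv.1 (r.getD kv.1 0 + (-1) * kv.2))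
        PySem.Dict.empty)) with hrB
  -- B's keys are exactly the union list
  have hkB : rB.keys = PySem.Set.union (PySem.Set.ofList da.keys) (PySem.Set.ofList db.keys) := by
    rw [hrB, PySem.Dict.keys_foldl_insert_key db.items Prod.fst,
        PySem.Dict.keys_foldl_insert_key da.items Prod.fst]
    rw [PySem.Dict.keys_empty, PySem.Set.update_nil_left]
    show PySem.Set.update (PySem.Set.ofList da.keys) db.keys = _
    rw [hoa, hob]
    rfl
  have hnkB : rB.keys.Nodup := hkB ▸ hnu
  -- B's lookups
  have hgB : ∀ x, rB.getD x 0 = db.getD x 0 - da.getD x 0 := by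
    intro x
    rw [hrB, accD, accD, PySem.Dict.getD_empty,
        sumf da.items (by simpa using hna) x, sumf db.items (by simpa using hnb) x]
    show 0 + -1 * da.getD x 0 + 1 * db.getD x 0 = _
    ring
  rw [hA, PySem.Dict.items_eq_map_keys rB hnkB 0, hkB]
  exact (List.map_congr_left fun k _ => by rw [hgB k]).symm
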